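-- pv_equiv track=rewrite | github.com/woongchantonylee/Python-Projects | WordSearch.py | bot_left
-- ===== SOURCE A (Python) =====
-- def bot_left(list_char, word_search, i, j, string_index):
--     if string_index == len(list_char):
--         return True  # word checks out if all letters accounted for
--     if i >= len(word_search) or j < 0:
--         return False  # end recursion if indices point out of bounds
--     # continue iterating if next letter exists in current index
--     if list_char[string_index] == word_search[i][j]:
--         return bot_left(list_char, word_search, i + 1, j - 1, string_index + 1)
--     return False
-- ===== SOURCE B (Python) =====
-- def bot_left(list_char, word_search, i, j, string_index):
--     if string_index == len(list_char):
--         return True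
--     if i >= len(word_search) or j < 0:
--         return False
--     for k in range(string_index, len(list_char)):
--         if i >= len(word_search) or j < 0:
--             return False
--         if list_char[k] != word_search[i][j]:
--             return False
--         i += 1
--         j -= 1
--     return True
-- ===== Notes on version B (the rewrite author's own statement) =====
-- stated objective: alternative
-- what changed: Replaced the one-call-per-letter recursion by a single iterative for-loop over the remaining word positions that threads (i, j) as mutable accumulators, with the base cases hoisted out in front.
-- outside the precondition, e.g. on bot_left(['b'], [['a', 'b'], ['c']], 0, 1, 0): A returns True, B returns True; on bot_left(['a', 'b'], [['x', 'a'], ['b', 'y'], ['c']], 0, 1, 0): A returns True, B returns True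
import Mathlib
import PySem

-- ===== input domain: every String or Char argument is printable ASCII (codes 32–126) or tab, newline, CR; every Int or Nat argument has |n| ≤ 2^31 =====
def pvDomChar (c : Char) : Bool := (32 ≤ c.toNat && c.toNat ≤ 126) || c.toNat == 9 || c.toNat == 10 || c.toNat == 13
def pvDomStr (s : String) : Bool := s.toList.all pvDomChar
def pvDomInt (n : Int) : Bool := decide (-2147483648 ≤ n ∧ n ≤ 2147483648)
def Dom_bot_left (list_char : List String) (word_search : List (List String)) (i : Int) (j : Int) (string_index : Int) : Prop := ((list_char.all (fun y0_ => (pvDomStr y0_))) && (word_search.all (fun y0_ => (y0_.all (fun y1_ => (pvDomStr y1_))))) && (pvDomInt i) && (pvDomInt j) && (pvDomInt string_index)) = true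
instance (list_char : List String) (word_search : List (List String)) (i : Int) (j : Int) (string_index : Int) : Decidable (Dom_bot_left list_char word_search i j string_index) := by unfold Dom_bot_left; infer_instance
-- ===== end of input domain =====

-- B replaces A's per-letter recursion by a single iterative for-loop threading (i, j); objective: alternative decomposition (O(1) stack).

-- ===== PORT A =====
-- Literal port of A's recursion; where Python's indexing would raise IndexError the
-- pyGet? pattern yields none and the port returns false — those inputs are outside Pre_.
def bot_left (list_char : List String) (word_search : List (List String)) (i : Int) (j : Int) (string_index : Int) : Bool :=
  if string_index = (list_char.length : Int) then true
  else if h : i ≥ (word_search.length : Int) ∨ j < 0 then false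
  else
    match PySem.List.pyGet? list_char string_index,
          (PySem.List.pyGet? word_search i).bind (fun row => PySem.List.pyGet? row j) with
    | some c, some d =>
        if c = d then bot_left list_char word_search (i + 1) (j - 1) (string_index + 1) else false
    | _, _ => false
termination_by ((word_search.length : Int) - i).toNat
decreasing_by push Not at h; omega

-- ===== PORT B =====
-- loop body of Source B's for-loop: state none = early 'return False', some (i, j) = live loop state
def diagStepB (list_char : List String) (word_search : List (List String)) :
    Option (Int × Int) → Int → Option (Int × Int) := fun st k =>
  match st with
  | none => none
  | some (i, j) =>
    if i ≥ (word_search.length : Int) ∨ j < 0 then none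
    else
      match PySem.List.pyGet? list_char k with
      | none => none
      | some c =>
        match (PySem.List.pyGet? word_search i).bind (fun row => PySem.List.pyGet? row j) with
        | none => none
        | some d => if c = d then some (i + 1, j - 1) else none

def bot_left_alt (list_char : List String) (word_search : List (List String)) (i : Int) (j : Int) (string_index : Int) : Bool :=
  if string_index = (list_char.length : Int) then true
  else if i ≥ (word_search.length : Int) ∨ j < 0 then false
  else
    ((PySem.List.pyRange string_index (list_char.length : Int) 1).foldl
        (diagStepB list_char word_search) (some (i, j))).isSome

-- ===== PRECONDITION & SPEC =====
-- Pre_ admits the two access-free early returns for arbitrary indices, and otherwise exactly the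
-- IndexError-free walks: list indices within Python's (negative-wraparound) range and, stated in
-- closed form, every grid row longer than j — this conservatively also excludes some ragged grids
-- whose short rows the diagonal walk never reaches (A and B agree and return there; see cites).
def Pre_bot_left (list_char : List String) (word_search : List (List String)) (i : Int) (j : Int) (string_index : Int) : Prop :=
  string_index = (list_char.length : Int)
  ∨ (i ≥ (word_search.length : Int) ∨ j < 0)
  ∨ (-(list_char.length : Int) ≤ string_index ∧ string_index ≤ (list_char.length : Int)
      ∧ -(word_search.length : Int) ≤ i
      ∧ ∀ r ∈ word_search, j < (r.length : Int))
instance (list_char : List String) (word_search : List (List String)) (i : Int) (j : Int) (string_index : Int) : Decidable (Pre_bot_left list_char word_search i j string_index) := by unfold Pre_bot_left; infer_instance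

def pvWitness_bot_left : List String × List (List String) × Int × Int × Int :=
  (["a", "b"], [["x", "a", "x"], ["b", "y", "y"], ["z", "z", "z"]], 0, 1, 0)

def Spec_bot_left (list_char : List String) (word_search : List (List String)) (i : Int) (j : Int) (string_index : Int) (out : Bool) : Prop := out = bot_left_alt list_char word_search i j string_index
instance (list_char : List String) (word_search : List (List String)) (i : Int) (j : Int) (string_index : Int) (out : Bool) : Decidable (Spec_bot_left list_char word_search i j string_index out) := by unfold Spec_bot_left; infer_instance

-- ===== CLAIM (what is proved, stated in full; the proofs are below) =====
def Claim_equal_bot_left : Prop := ∀ (list_char : List String) (word_search : List (List String)) (i : Int) (j : Int) (string_index : Int), Dom_bot_left list_char word_search i j string_index → Pre_bot_left list_char word_search i j string_index → Spec_bot_left list_char word_search i j string_index (bot_left list_char word_search i j string_index)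

-- ===== LEMMAS AND PROOFS =====

lemma foldl_diagStepB_none (list_char : List String) (word_search : List (List String))
    (l : List Int) : l.foldl (diagStepB list_char word_search) none = none := by
  induction l with
  | nil => rfl
  | cons x xs ih => simpa [diagStepB] using ih

-- A's recursion equals B's fold for every start index ≤ len(list_char).
lemma bot_left_eq_fold (list_char : List String) (word_search : List (List String)) :
    ∀ n (i j si : Int), ((list_char.length : Int) - si).toNat = n →
      si ≤ (list_char.length : Int) →
      bot_left list_char word_search i j si =
        ((PySem.List.pyRange si (list_char.length : Int) 1).foldl
          (diagStepB list_char word_search) (some (i, j))).isSome := by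
  intro n
  induction n with
  | zero =>
    intro i j si hn hle
    have hsi : si = (list_char.length : Int) := by omega
    rw [bot_left]
    simp [hsi, PySem.List.pyRange_one_eq_nil (le_refl _)]
  | succ m ih =>
    intro i j si hn hle
    have hlt : si < (list_char.length : Int) := by omega
    have hne : si ≠ (list_char.length : Int) := by omega
    rw [bot_left, PySem.List.pyRange_one_cons hlt]
    simp only [List.foldl_cons]
    by_cases hb : i ≥ (word_search.length : Int) ∨ j < 0
    · simp [hne, hb, diagStepB, foldl_diagStepB_none]
    · simp only [hne, if_false, dif_neg hb]
      rcases hc : PySem.List.pyGet? list_char si with _ | c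
      · simp [diagStepB, hb, hc, foldl_diagStepB_none]
      · rcases hd : (PySem.List.pyGet? word_search i).bind
            (fun row => PySem.List.pyGet? row j) with _ | d
        · simp [diagStepB, hb, hc, hd, foldl_diagStepB_none]
        · by_cases hcd : c = d
          · simp only [diagStepB, hb, if_false, hc, hd, hcd, if_true]
            exact ih (i + 1) (j - 1) (si + 1) (by omega) (by omega)
          · simp [diagStepB, hb, hc, hd, hcd, foldl_diagStepB_none]

-- ===== VERDICT (by name: the statement is the Claim_ definition above) =====
theorem bot_left_spec : Claim_equal_bot_left := by
  intro list_char word_search i j si _ hpre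
  show _ = _
  unfold bot_left_alt
  by_cases hsi : si = (list_char.length : Int)
  · rw [bot_left]; simp [hsi]
  · by_cases hb : i ≥ (word_search.length : Int) ∨ j < 0
    · rw [bot_left]
      simp [hsi, hb]
    · have hle : si ≤ (list_char.length : Int) := by
        rcases hpre with h | h | h
        · exact le_of_eq h
        · exact absurd h hb
        · exact h.2.1
      rw [bot_left_eq_fold list_char word_search _ i j si rfl hle]
      simp [hsi, hb]
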